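-- pv_equiv track=rewrite | github.com/urimL/Algorithm | 프로그래머스/3/12987. 숫자 게임/숫자 게임.py | solution
-- ===== SOURCE A (Python) =====
-- def solution(A, B):
--
--     def binarySearch(x):
--         start, end = 0, len(B)-1
--         idx = -1
--
--         while start <= end:
--             mid = (start+end)//2
--
--             if B[mid] <= x:
--                 start = mid+1
--             else:
--                 idx = mid
--                 end = mid-1
--
--         return idx
--
--     answer = 0
--     B.sort()
--     visited = [False] * len(B)
--
--     for i in A:
--         now = binarySearch(i)
--
--         while visited[now] and now < len(B)-1:
--             now += 1
--
--         if not visited[now] and B[now] > i: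
--             answer += 1
--             visited[now] = True
--
--     return answer
-- ===== SOURCE B (Python) =====
-- def solution(A, B):
--     B.sort()
--     avail = B[:]  # remaining candidates, kept in ascending order
--     answer = 0
--     for i in A:
--         # leftmost position whose candidate is > i (bisect_right, by hand)
--         lo, hi = 0, len(avail)
--         while lo < hi:
--             mid = (lo + hi) // 2
--             if avail[mid] <= i:
--                 lo = mid + 1
--             else:
--                 hi = mid
--         if lo < len(avail):
--             del avail[lo]
--             answer += 1
--     return answer
-- ===== Notes on version B (the rewrite author's own statement) =====
-- stated objective: simpler
-- what changed: B drops A's visited-flag array and linear skip loop; it keeps one sorted list of still-available B-elements and, per element of A, bisects (bisect_right by hand) to the first available element strictly greater than it and deletes it.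
import Mathlib
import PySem

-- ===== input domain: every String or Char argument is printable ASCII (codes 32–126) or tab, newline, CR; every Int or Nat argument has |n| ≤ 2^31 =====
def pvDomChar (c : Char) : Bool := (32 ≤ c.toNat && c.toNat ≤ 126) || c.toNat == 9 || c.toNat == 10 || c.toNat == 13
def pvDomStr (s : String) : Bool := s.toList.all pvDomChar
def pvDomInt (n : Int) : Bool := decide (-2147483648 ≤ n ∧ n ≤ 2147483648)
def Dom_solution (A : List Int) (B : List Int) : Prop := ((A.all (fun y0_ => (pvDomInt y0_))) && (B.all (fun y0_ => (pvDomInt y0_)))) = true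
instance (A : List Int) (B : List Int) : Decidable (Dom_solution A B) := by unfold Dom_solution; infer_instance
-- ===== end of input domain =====

-- B is a simpler re-implementation: no hand-written binary search, no visited-flag
-- array, no skip loop — just a sorted availability list with first-greater deletion.
-- Both A and B sort the argument B in place (same observable mutation); the theorems
-- below are about the return value.

-- ===== PORT A =====
-- the 'while start <= end' loop of binarySearch
def pvBsLoop (Bs : List Int) (x : Int) (start e idx : Int) : Int :=
  if h : start ≤ e then
    if PySem.List.pyGetD Bs (PySem.Int.floordiv (start + e) 2) 0 ≤ x then
      pvBsLoop Bs x (PySem.Int.floordiv (start + e) 2 + 1) e idx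
    else
      pvBsLoop Bs x start (PySem.Int.floordiv (start + e) 2 - 1) (PySem.Int.floordiv (start + e) 2)
  else idx
termination_by (e + 1 - start).toNat
decreasing_by
  · have := PySem.Int.floordiv_two_mid_bounds h; omega
  · have := PySem.Int.floordiv_two_mid_bounds h; omega

-- the 'while visited[now] and now < len(B)-1' loop
def pvSkipLoop (visited : List Bool) (lenB : Int) (now : Int) : Int :=
  if h : PySem.List.pyGetD visited now false = true ∧ now < lenB - 1 then
    pvSkipLoop visited lenB (now + 1)
  else now
termination_by (lenB - 1 - now).toNat
decreasing_by omega

-- the body of 'for i in A' (state: visited, answer)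
def pvStepA (Bs : List Int) (st : List Bool × Int) (i : Int) : List Bool × Int :=
  let now := pvSkipLoop st.1 (Bs.length : Int)
    (pvBsLoop Bs i 0 ((Bs.length : Int) - 1) (-1))
  if PySem.List.pyGetD st.1 now false = false ∧ i < PySem.List.pyGetD Bs now 0 then
    (PySem.List.pySetD st.1 now true, st.2 + 1)
  else (st.1, st.2)

def solution (A : List Int) (B : List Int) : Int :=
  let Bs := PySem.List.sorted B (fun x => x)
  (A.foldl (pvStepA Bs) (List.replicate Bs.length false, 0)).2

-- ===== PORT B =====
-- the 'while lo < hi' loop (hand-written bisect_right)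
def pvBisLoop (av : List Int) (i : Int) (lo hi : Int) : Int :=
  if h : lo < hi then
    if PySem.List.pyGetD av (PySem.Int.floordiv (lo + hi) 2) 0 ≤ i then
      pvBisLoop av i (PySem.Int.floordiv (lo + hi) 2 + 1) hi
    else
      pvBisLoop av i lo (PySem.Int.floordiv (lo + hi) 2)
  else lo
termination_by (hi - lo).toNat
decreasing_by
  · simp only [PySem.Int.floordiv_eq_ediv_of_pos (by norm_num : (0:Int) < 2)]; omega
  · simp only [PySem.Int.floordiv_eq_ediv_of_pos (by norm_num : (0:Int) < 2)]; omega

-- the body of 'for i in A' (state: avail, answer)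
def pvStepB (st : List Int × Int) (i : Int) : List Int × Int :=
  let lo := pvBisLoop st.1 i 0 (st.1.length : Int)
  if lo < (st.1.length : Int) then (st.1.eraseIdx lo.toNat, st.2 + 1) else (st.1, st.2)

def solution_alt (A : List Int) (B : List Int) : Int :=
  (A.foldl pvStepB (PySem.List.sorted B (fun x => x), 0)).2

-- ===== PRECONDITION & SPEC =====
-- Pre_ excludes only B = [] with A ≠ [], where the Python A raises IndexError (visited[-1]).
def Pre_solution (A : List Int) (B : List Int) : Prop := B ≠ [] ∨ A = []
instance (A : List Int) (B : List Int) : Decidable (Pre_solution A B) := by unfold Pre_solution; infer_instance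
def pvWitness_solution : List Int × List Int := ([1, 5, 3], [2, 4])

def Spec_solution (A : List Int) (B : List Int) (out : Int) : Prop := out = solution_alt A B
instance (A : List Int) (B : List Int) (out : Int) : Decidable (Spec_solution A B out) := by unfold Spec_solution; infer_instance

-- ===== CLAIM (what is proved, stated in full; the proofs are below) =====
def Claim_equal_solution : Prop := ∀ (A : List Int) (B : List Int), Dom_solution A B → Pre_solution A B → Spec_solution A B (solution A B)

-- ===== LEMMAS AND PROOFS =====

-- proof-side model: the zipped state (B-value, visited-flag)
def pvSieve : List (Int × Bool) → List Int
  | [] => []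
  | (b, v) :: t => if v then pvSieve t else b :: pvSieve t

-- mark the first entry that is unvisited and strictly greater than i
def pvMark (i : Int) : List (Int × Bool) → Option (List (Int × Bool))
  | [] => none
  | (b, v) :: t =>
    if v = false ∧ i < b then some ((b, true) :: t)
    else (pvMark i t).map ((b, v) :: ·)

-- index j of a sorted list satisfies ≤ i iff j < count of elements ≤ i
lemma pv_countP_le_iff (l : List Int) (i : Int) (hp : l.Pairwise (· ≤ ·)) :
    ∀ (j : Nat) (hj : j < l.length),
      (l[j] ≤ i ↔ j < l.countP (fun v => decide (v ≤ i))) := by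
  induction l with
  | nil => intro j hj; simp at hj
  | cons a t ih =>
    rcases List.pairwise_cons.mp hp with ⟨ha, hpt⟩
    intro j hj
    by_cases hai : a ≤ i
    · cases j with
      | zero => simpa [List.countP_cons, hai] using Nat.succ_pos _
      | succ k =>
        have hk := ih hpt k (by simpa using Nat.lt_of_succ_lt_succ hj)
        simp only [List.getElem_cons_succ, List.countP_cons, hai, decide_true,
          if_true]
        rw [hk]; omega
    · have ht : t.countP (fun v => decide (v ≤ i)) = 0 := by
        rw [List.countP_eq_zero]
        intro b hb
        have := ha b hb
        simp only [decide_eq_true_eq]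
        omega
      cases j with
      | zero =>
        simp only [List.getElem_cons_zero, List.countP_cons, ht, hai, decide_false]
        simp [hai]
      | succ k =>
        have hb := ha (t[k]'(by simpa using Nat.lt_of_succ_lt_succ hj))
          (List.getElem_mem _)
        simp only [List.getElem_cons_succ, List.countP_cons, ht, hai, decide_false]
        constructor
        · intro h; omega
        · intro h; simp at h

lemma pv_bsLoop_inv (l : List Int) (i : Int) (hp : l.Pairwise (· ≤ ·)) :
    ∀ (start e idx : Int), 0 ≤ start →
      start ≤ (l.countP (fun v => decide (v ≤ i)) : Int) →
      e ≤ (l.length : Int) - 1 →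
      ((idx = -1 ∧ e = (l.length : Int) - 1) ∨
        (idx = e + 1 ∧ (l.countP (fun v => decide (v ≤ i)) : Int) ≤ idx ∧ idx ≤ (l.length : Int) - 1)) →
      pvBsLoop l i start e idx =
        (if l.countP (fun v => decide (v ≤ i)) < l.length
          then (l.countP (fun v => decide (v ≤ i)) : Int) else -1) := by
  intro start e idx
  have hclen : l.countP (fun v => decide (v ≤ i)) ≤ l.length := List.countP_le_length
  fun_induction pvBsLoop l i start e idx with
  | case1 start e idx hle htest ih =>
    intro h0 hc he hd
    have hmid := PySem.Int.floordiv_two_mid_bounds hle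
    have hmlt : ((PySem.Int.floordiv (start + e) 2).toNat : Int) < (l.length : Int) := by omega
    rw [PySem.List.pyGetD_eq_getElem l 0 (by omega) (by omega)] at htest
    have hidx := (pv_countP_le_iff l i hp (PySem.Int.floordiv (start + e) 2).toNat
      (by exact_mod_cast hmlt)).mp htest
    exact ih (by omega) (by omega) he hd
  | case2 start e idx hle htest ih =>
    intro h0 hc he hd
    have hmid := PySem.Int.floordiv_two_mid_bounds hle
    have hmlt : ((PySem.Int.floordiv (start + e) 2).toNat : Int) < (l.length : Int) := by omega
    rw [PySem.List.pyGetD_eq_getElem l 0 (by omega) (by omega)] at htest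
    have hidx : ¬ ((PySem.Int.floordiv (start + e) 2).toNat <
        l.countP (fun v => decide (v ≤ i))) := fun h =>
      htest ((pv_countP_le_iff l i hp _ (by exact_mod_cast hmlt)).mpr h)
    exact ih h0 hc (by omega) (Or.inr ⟨by omega, by omega, by omega⟩)
  | case3 start e idx hle =>
    intro h0 hc he hd
    rcases hd with ⟨rfl, hend⟩ | ⟨hidx, hge, hlt⟩
    · rw [if_neg (by omega)]
    · rw [if_pos (by omega)]
      omega

lemma pv_bs_correct (l : List Int) (i : Int) (hp : l.Pairwise (· ≤ ·)) :
    pvBsLoop l i 0 ((l.length : Int) - 1) (-1) =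
      (if l.countP (fun v => decide (v ≤ i)) < l.length
        then (l.countP (fun v => decide (v ≤ i)) : Int) else -1) := by
  exact pv_bsLoop_inv l i hp 0 ((l.length : Int) - 1) (-1) (by omega) (by omega)
    (by omega) (Or.inl ⟨rfl, rfl⟩)

lemma pv_skip_bounds (visited : List Bool) (lenB : Int) :
    ∀ now : Int, -1 ≤ now → now ≤ lenB - 1 →
      -1 ≤ pvSkipLoop visited lenB now ∧ pvSkipLoop visited lenB now ≤ lenB - 1 := by
  intro now
  fun_induction pvSkipLoop visited lenB now with
  | case1 now h ih => intro h0 h1; exact ih (by omega) (by omega)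
  | case2 now h => intro h0 h1; exact ⟨h0, h1⟩

lemma pv_skip_spec (visited : List Bool) (lenB : Int) :
    ∀ now : Int, 0 ≤ now → now ≤ lenB - 1 →
      now ≤ pvSkipLoop visited lenB now ∧
      pvSkipLoop visited lenB now ≤ lenB - 1 ∧
      (∀ j : Int, now ≤ j → j < pvSkipLoop visited lenB now →
        PySem.List.pyGetD visited j false = true) ∧
      (PySem.List.pyGetD visited (pvSkipLoop visited lenB now) false = false ∨
        pvSkipLoop visited lenB now = lenB - 1) := by
  intro now
  fun_induction pvSkipLoop visited lenB now with
  | case1 now h ih =>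
    intro h0 h1
    obtain ⟨ha, hb, hc, hd⟩ := ih (by omega) (by omega)
    refine ⟨by omega, hb, ?_, hd⟩
    intro j hj1 hj2
    by_cases hje : j = now
    · subst hje; exact h.1
    · exact hc j (by omega) hj2
  | case2 now h =>
    intro h0 h1
    refine ⟨le_refl _, h1, fun j hj1 hj2 => absurd (lt_of_le_of_lt hj1 hj2) (lt_irrefl _), ?_⟩
    rcases not_and_or.mp h with h' | h'
    · exact Or.inl (by simpa using h')
    · exact Or.inr (by omega)

lemma pv_mark_none_iff (i : Int) (L : List (Int × Bool)) :
    pvMark i L = none ↔ ∀ p ∈ L, p.2 = true ∨ p.1 ≤ i := by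
  induction L with
  | nil => simp [pvMark]
  | cons p t ih =>
    obtain ⟨b, v⟩ := p
    by_cases h : v = false ∧ i < b
    · simp only [pvMark, if_pos h]
      constructor
      · intro hc; cases hc
      · intro hall
        rcases hall (b, v) (List.mem_cons_self) with h1 | h1
        · simp [h.1] at h1
        · exact absurd h1 (by omega)
    · simp only [pvMark, if_neg h, Option.map_eq_none_iff, ih, List.mem_cons]
      constructor
      · rintro hall p (rfl | hp)
        · by_cases hv : v = false
          · exact Or.inr (by push_neg at h; simpa using h hv)
          · exact Or.inl (by simpa using hv)
        · exact hall p hp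
      · intro hall p hp; exact hall p (Or.inr hp)

lemma pv_mark_eq_some (i : Int) :
    ∀ (L : List (Int × Bool)) (r : Nat) (hr : r < L.length),
      (∀ j : Nat, (hj : j < r) → (L[j]'(by omega)).2 = true ∨ (L[j]'(by omega)).1 ≤ i) →
      (L[r]).2 = false → i < (L[r]).1 →
      pvMark i L = some (L.set r ((L[r]).1, true)) := by
  intro L
  induction L with
  | nil => intro r hr; simp at hr
  | cons p t ih =>
    obtain ⟨b, v⟩ := p
    intro r hr hprev hv hgt
    cases r with
    | zero =>
      simp only [List.getElem_cons_zero] at hv hgt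
      simp [pvMark, hv, hgt, List.set]
    | succ k =>
      have hhead := hprev 0 (Nat.succ_pos k)
      simp only [List.getElem_cons_zero] at hhead
      have hcond : ¬ (v = false ∧ i < b) := by
        rcases hhead with h1 | h1
        · rintro ⟨h2, _⟩; rw [h1] at h2; cases h2
        · rintro ⟨_, h2⟩; omega
      simp only [List.getElem_cons_succ] at hv hgt
      rw [pvMark, if_neg hcond,
        ih k (by simpa using Nat.lt_of_succ_lt_succ hr)
          (fun j hj => by
            have := hprev (j + 1) (by omega)
            simpa using this) hv hgt]
      simp [List.set]

lemma pv_mem_sieve {x : Int} : ∀ {L : List (Int × Bool)}, x ∈ pvSieve L → (x, false) ∈ L := by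
  intro L
  induction L with
  | nil => simp [pvSieve]
  | cons p t ih =>
    obtain ⟨b, v⟩ := p
    cases v with
    | false =>
      intro h
      rcases List.mem_cons.mp (by simpa [pvSieve] using h) with rfl | h
      · exact List.mem_cons_self
      · exact List.mem_cons_of_mem _ (ih h)
    | true => intro h; exact List.mem_cons_of_mem _ (ih (by simpa [pvSieve] using h))

lemma pv_sieve_sublist : ∀ (bs : List Int) (vs : List Bool),
    (pvSieve (bs.zip vs)).Sublist bs := by
  intro bs
  induction bs with
  | nil => intro vs; simp [pvSieve]
  | cons b t ih =>
    intro vs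
    cases vs with
    | nil => simp [pvSieve]
    | cons v vt =>
      cases v with
      | false => simpa [pvSieve] using (ih vt).cons₂ b
      | true => simpa [pvSieve] using (ih vt).cons b

lemma pv_sieve_replicate (l : List Int) :
    pvSieve (l.zip (List.replicate l.length false)) = l := by
  induction l with
  | nil => simp [pvSieve]
  | cons b t ih => simpa [pvSieve, List.replicate_succ] using ih

lemma pv_zip_set (bs : List Int) :
    ∀ (vs : List Bool) (r : Nat) (hr : r < bs.length), vs.length = bs.length →
      bs.zip (vs.set r true) = (bs.zip vs).set r (bs[r], true) := by
  induction bs with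
  | nil => intro vs r hr; simp at hr
  | cons b t ih =>
    intro vs r hr hlen
    cases vs with
    | nil => simp at hlen
    | cons v vt =>
      cases r with
      | zero => simp
      | succ k =>
        simp only [List.zip_cons_cons, List.set_cons_succ, List.getElem_cons_succ]
        rw [ih vt k (by simpa using Nat.lt_of_succ_lt_succ hr) (by simpa using hlen)]

lemma pv_sieve_none (i : Int) (L : List (Int × Bool)) (hnone : pvMark i L = none) :
    (pvSieve L).countP (fun v => decide (v ≤ i)) = (pvSieve L).length := by
  rw [List.countP_eq_length]
  intro x hx
  have := (pv_mark_none_iff i L).mp hnone (x, false) (pv_mem_sieve hx)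
  simpa using this

lemma pv_sieve_some (i : Int) :
    ∀ (L L' : List (Int × Bool)), (pvSieve L).Pairwise (· ≤ ·) →
      pvMark i L = some L' →
      (pvSieve L).countP (fun v => decide (v ≤ i)) < (pvSieve L).length ∧
      (pvSieve L).eraseIdx ((pvSieve L).countP (fun v => decide (v ≤ i))) = pvSieve L' := by
  intro L
  induction L with
  | nil => intro L' _ h; simp [pvMark] at h
  | cons p t ih =>
    obtain ⟨b, v⟩ := p
    intro L' hp hsome
    cases v with
    | true =>
      simp only [pvSieve, if_true] at hp ⊢
      rw [pvMark, if_neg (by simp : ¬((true : Bool) = false ∧ i < b))] at hsome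
      cases ht : pvMark i t with
      | none => rw [ht] at hsome; simp at hsome
      | some t' =>
        rw [ht] at hsome
        obtain rfl : (b, true) :: t' = L' := by simpa using hsome
        simpa [pvSieve] using ih t' hp ht
    | false =>
      simp only [pvSieve, if_neg (by simp : ¬ (false : Bool) = true)] at hp ⊢
      by_cases hb : i < b
      · rw [pvMark, if_pos ⟨rfl, hb⟩] at hsome
        cases hsome
        have hc : (b :: pvSieve t).countP (fun v => decide (v ≤ i)) = 0 := by
          rw [List.countP_eq_zero]
          intro x hx
          rcases List.mem_cons.mp hx with rfl | hx
          · simp; omega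
          · have hbt := (List.pairwise_cons.mp hp).1 x hx
            simp; omega
        simp [hc, pvSieve]
      · rw [pvMark, if_neg (by tauto), Option.map_eq_some_iff] at hsome
        rcases hsome with ⟨t', ht', rfl⟩
        have hpt := (List.pairwise_cons.mp hp).2
        rcases ih t' hpt ht' with ⟨h1, h2⟩
        have hcount : (b :: pvSieve t).countP (fun v => decide (v ≤ i)) =
            (pvSieve t).countP (fun v => decide (v ≤ i)) + 1 := by
          simp [List.countP_cons, (by omega : b ≤ i)]
        refine ⟨by simpa [hcount] using h1, ?_⟩
        rw [hcount]
        simpa [pvSieve, List.eraseIdx_cons_succ] using h2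

lemma pv_bisLoop_inv (av : List Int) (i : Int) (hp : av.Pairwise (· ≤ ·)) :
    ∀ (lo hi : Int), 0 ≤ lo →
      lo ≤ (av.countP (fun v => decide (v ≤ i)) : Int) →
      (av.countP (fun v => decide (v ≤ i)) : Int) ≤ hi →
      hi ≤ (av.length : Int) →
      pvBisLoop av i lo hi = (av.countP (fun v => decide (v ≤ i)) : Int) := by
  intro lo hi
  fun_induction pvBisLoop av i lo hi with
  | case1 lo hi hlt htest ih =>
    intro h0 hlo hhi hlen
    have hmid := PySem.Int.floordiv_two_mid_bounds (le_of_lt hlt)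
    have hmhi : PySem.Int.floordiv (lo + hi) 2 < hi := by
      rw [PySem.Int.floordiv_eq_ediv_of_pos (by norm_num : (0:Int) < 2)]; omega
    rw [PySem.List.pyGetD_eq_getElem av 0 (by omega) (by omega)] at htest
    have hidx := (pv_countP_le_iff av i hp (PySem.Int.floordiv (lo + hi) 2).toNat
      (by omega)).mp htest
    exact ih (by omega) (by omega) hhi hlen
  | case2 lo hi hlt htest ih =>
    intro h0 hlo hhi hlen
    have hmid := PySem.Int.floordiv_two_mid_bounds (le_of_lt hlt)
    have hmhi : PySem.Int.floordiv (lo + hi) 2 < hi := by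
      rw [PySem.Int.floordiv_eq_ediv_of_pos (by norm_num : (0:Int) < 2)]; omega
    rw [PySem.List.pyGetD_eq_getElem av 0 (by omega) (by omega)] at htest
    have hidx : ¬ ((PySem.Int.floordiv (lo + hi) 2).toNat <
        av.countP (fun v => decide (v ≤ i))) := fun h =>
      htest ((pv_countP_le_iff av i hp _ (by omega)).mpr h)
    exact ih h0 hlo (by omega) (by omega)
  | case3 lo hi hlt =>
    intro h0 hlo hhi hlen
    omega

lemma pv_bis_correct (av : List Int) (i : Int) (hp : av.Pairwise (· ≤ ·)) :
    pvBisLoop av i 0 (av.length : Int) = (av.countP (fun v => decide (v ≤ i)) : Int) := by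
  have := List.countP_le_length (p := fun v => decide (v ≤ i)) (l := av)
  exact pv_bisLoop_inv av i hp 0 (av.length : Int) (by omega) (by omega) (by omega) (by omega)

lemma pv_step_correspond (Bs : List Int) (hp : Bs.Pairwise (· ≤ ·)) (hne : Bs ≠ [])
    (visited : List Bool) (hlen : visited.length = Bs.length) (n i : Int) :
    (pvStepA Bs (visited, n) i).2 = (pvStepB (pvSieve (Bs.zip visited), n) i).2 ∧
    pvSieve (Bs.zip (pvStepA Bs (visited, n) i).1) = (pvStepB (pvSieve (Bs.zip visited), n) i).1 ∧
    (pvStepA Bs (visited, n) i).1.length = Bs.length := by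
  have hbs := pv_bs_correct Bs i hp
  have hlen1 : 0 < Bs.length := List.length_pos_iff.mpr hne
  have hsp : (pvSieve (Bs.zip visited)).Pairwise (· ≤ ·) :=
    hp.sublist (pv_sieve_sublist Bs visited)
  have hLlen : (Bs.zip visited).length = Bs.length := by rw [List.length_zip]; omega
  by_cases hcase : Bs.countP (fun v => decide (v ≤ i)) < Bs.length
  · -- binarySearch returns the count c of elements ≤ i
    have hnow0 : pvBsLoop Bs i 0 ((Bs.length : Int) - 1) (-1) =
        ((Bs.countP (fun v => decide (v ≤ i)) : Nat) : Int) := by rw [hbs, if_pos hcase]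
    obtain ⟨hr1, hr2, hr3, hr4⟩ := pv_skip_spec visited (Bs.length : Int)
      ((Bs.countP (fun v => decide (v ≤ i)) : Nat) : Int) (by omega) (by omega)
    set r := pvSkipLoop visited (Bs.length : Int)
      ((Bs.countP (fun v => decide (v ≤ i)) : Nat) : Int) with hrdef
    have hrlt : r.toNat < Bs.length := by omega
    have hrv : r.toNat < visited.length := by omega
    have hgetv : PySem.List.pyGetD visited r false = visited[r.toNat] := by
      rw [PySem.List.pyGetD_eq_getElem visited false (by omega) (by omega)]
    have hgetb : PySem.List.pyGetD Bs r 0 = Bs[r.toNat] := by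
      rw [PySem.List.pyGetD_eq_getElem Bs 0 (by omega) (by omega)]
    have hgtb : i < Bs[r.toNat] := by
      by_contra h
      push_neg at h
      have := (pv_countP_le_iff Bs i hp r.toNat hrlt).mp h
      omega
    have hLr : (Bs.zip visited)[r.toNat]'(by omega) = (Bs[r.toNat], visited[r.toNat]) :=
      List.getElem_zip
    cases hv : visited[r.toNat] with
    | false =>
      have hmark : pvMark i (Bs.zip visited) =
          some ((Bs.zip visited).set r.toNat (Bs[r.toNat], true)) := by
        have hsome := pv_mark_eq_some i (Bs.zip visited) r.toNat (by omega)
          (fun j hj => by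
            rw [(List.getElem_zip :
              (Bs.zip visited)[j]'(by omega) = (Bs[j]'(by omega), visited[j]'(by omega)))]
            by_cases hjc : j < Bs.countP (fun v => decide (v ≤ i))
            · exact Or.inr ((pv_countP_le_iff Bs i hp j (by omega)).mpr hjc)
            · refine Or.inl ?_
              have := hr3 (j : Int) (by omega) (by omega)
              rw [PySem.List.pyGetD_eq_getElem visited false (by omega) (by omega)] at this
              simpa using this)
          (by rw [hLr]; exact hv) (by rw [hLr]; exact hgtb)
        rwa [hLr] at hsome
      obtain ⟨hblt, hberase⟩ := pv_sieve_some i (Bs.zip visited) _ hsp hmark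
      have hstepA : pvStepA Bs (visited, n) i = (visited.set r.toNat true, n + 1) := by
        simp only [pvStepA, hnow0, ← hrdef, hgetv, hgetb]
        rw [if_pos ⟨hv, hgtb⟩, PySem.List.pySetD_of_nonneg _ _ (by omega)]
      have hstepB : pvStepB (pvSieve (Bs.zip visited), n) i =
          ((pvSieve (Bs.zip visited)).eraseIdx
            ((pvSieve (Bs.zip visited)).countP (fun v => decide (v ≤ i))), n + 1) := by
        simp only [pvStepB, pv_bis_correct _ i hsp]
        rw [if_pos (by exact_mod_cast hblt)]
        simp
      rw [hstepA, hstepB]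
      refine ⟨rfl, ?_, by simpa using hlen⟩
      show pvSieve (Bs.zip (visited.set r.toNat true)) = _
      rw [pv_zip_set Bs visited r.toNat hrlt hlen, hberase]
    | true =>
      have hrtop : r = (Bs.length : Int) - 1 := by
        rcases hr4 with h | h
        · rw [hgetv, hv] at h; cases h
        · exact h
      have hmark : pvMark i (Bs.zip visited) = none := by
        rw [pv_mark_none_iff]
        intro p hpmem
        obtain ⟨j, hj, rfl⟩ := List.mem_iff_getElem.mp hpmem
        rw [hLlen] at hj
        rw [(List.getElem_zip :
          (Bs.zip visited)[j]'(by omega) = (Bs[j]'(by omega), visited[j]'(by omega)))]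
        by_cases hjc : j < Bs.countP (fun v => decide (v ≤ i))
        · exact Or.inr ((pv_countP_le_iff Bs i hp j (by omega)).mpr hjc)
        · refine Or.inl ?_
          by_cases hjr : j = r.toNat
          · simpa [hjr] using hv
          · have := hr3 (j : Int) (by omega) (by omega)
            rw [PySem.List.pyGetD_eq_getElem visited false (by omega) (by omega)] at this
            simpa using this
      have hcnt := pv_sieve_none i _ hmark
      have hstepA : pvStepA Bs (visited, n) i = (visited, n) := by
        simp only [pvStepA, hnow0, ← hrdef]
        rw [if_neg]
        rintro ⟨h1, -⟩
        rw [hgetv, hv] at h1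
        cases h1
      have hstepB : pvStepB (pvSieve (Bs.zip visited), n) i = (pvSieve (Bs.zip visited), n) := by
        simp only [pvStepB, pv_bis_correct _ i hsp]
        rw [if_neg (by exact_mod_cast by omega)]
      rw [hstepA, hstepB]
      exact ⟨rfl, rfl, hlen⟩
  · -- no element of B is greater than i: binarySearch returns -1
    have hceq : Bs.countP (fun v => decide (v ≤ i)) = Bs.length := by
      have := List.countP_le_length (p := fun v => decide (v ≤ i)) (l := Bs); omega
    have hnow0 : pvBsLoop Bs i 0 ((Bs.length : Int) - 1) (-1) = -1 := by rw [hbs, if_neg hcase]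
    obtain ⟨hb1, hb2⟩ := pv_skip_bounds visited (Bs.length : Int) (-1) (by omega) (by omega)
    set r := pvSkipLoop visited (Bs.length : Int) (-1) with hrdef
    have hall : ∀ x ∈ Bs, x ≤ i := by
      intro x hx
      simpa using List.countP_eq_length.mp hceq x hx
    have hgetb : PySem.List.pyGetD Bs r 0 ≤ i :=
      hall _ (PySem.List.pyGetD_mem Bs 0 ⟨by omega, by omega⟩)
    have hmark : pvMark i (Bs.zip visited) = none := by
      rw [pv_mark_none_iff]
      rintro ⟨a, b⟩ hpmem
      exact Or.inr (hall a (List.of_mem_zip hpmem).1)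
    have hcnt := pv_sieve_none i _ hmark
    have hstepA : pvStepA Bs (visited, n) i = (visited, n) := by
      simp only [pvStepA, hnow0, ← hrdef]
      rw [if_neg]
      rintro ⟨-, h2⟩
      omega
    have hstepB : pvStepB (pvSieve (Bs.zip visited), n) i = (pvSieve (Bs.zip visited), n) := by
      simp only [pvStepB, pv_bis_correct _ i hsp]
      rw [if_neg (by exact_mod_cast by omega)]
    rw [hstepA, hstepB]
    exact ⟨rfl, rfl, hlen⟩

lemma pv_fold_correspond (Bs : List Int) (hp : Bs.Pairwise (· ≤ ·)) (hne : Bs ≠ []) :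
    ∀ (as : List Int) (visited : List Bool) (n : Int), visited.length = Bs.length →
      (as.foldl (pvStepA Bs) (visited, n)).2 =
      (as.foldl pvStepB (pvSieve (Bs.zip visited), n)).2 := by
  intro as
  induction as with
  | nil => intro visited n hlen; rfl
  | cons x t ih =>
    intro visited n hlen
    obtain ⟨h2, h1, hl⟩ := pv_step_correspond Bs hp hne visited hlen n x
    simp only [List.foldl_cons]
    have hB : pvStepB (pvSieve (Bs.zip visited), n) x =
        (pvSieve (Bs.zip (pvStepA Bs (visited, n) x).1), (pvStepA Bs (visited, n) x).2) := by
      exact Prod.ext h1.symm h2.symm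
    rw [hB]
    have := ih (pvStepA Bs (visited, n) x).1 (pvStepA Bs (visited, n) x).2 hl
    simpa using this

-- ===== VERDICT (by name: the statement is the Claim_ definition above) =====
theorem solution_spec : Claim_equal_solution := by
  intro A B _ hpre
  unfold Spec_solution solution solution_alt
  rcases hpre with hB | hA
  · have hp : (PySem.List.sorted B (fun x => x)).Pairwise (· ≤ ·) := by
      simpa using PySem.List.sorted_pairwise B (fun x => x)
    have hne : PySem.List.sorted B (fun x => x) ≠ [] := by
      intro h
      apply hB
      have := PySem.List.length_sorted B (fun x => x) false
      rw [h] at this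
      exact List.length_eq_zero_iff.mp this.symm
    have := pv_fold_correspond _ hp hne A
      (List.replicate (PySem.List.sorted B (fun x => x)).length false) 0 (by simp)
    rw [pv_sieve_replicate (PySem.List.sorted B (fun x => x))] at this
    exact this
  · subst hA
    simp
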